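-- pv_equiv track=rewrite | github.com/dsgt-kaggle-clef/bioasq-2024 | BioNNE/helper_utils.py | find_all_loc_in_text
-- ===== SOURCE A (Python) =====
-- def get_altname(entity):
--     '''
--     Get the alternative name of the entity
--     '''
--     alt_entity = entity
--     if entity[0].isupper():
--         alt_entity = entity[0].lower() + entity[1:]
--     if entity[0].islower():
--         alt_entity = entity[0].upper() + entity[1:]
--     return alt_entity
--
-- def find_entity_loc_in_text(entity, text, start_ind):
--     '''
--     Find the location of the entity in the text
--     '''
--     loc = text.find(entity, start_ind)
--     if loc == -1:
--         return None
--     return (loc, loc + len(entity))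
--
-- def find_all_loc_in_text(entity, text):
--     '''
--     Find all the location of the entity in the text
--     '''
--     loc_list = []
--     allforms = [entity]
--     if get_altname(entity) != entity:
--         allforms.append(get_altname(entity))
--     for form in allforms:
--         start_ind = 0
--         while start_ind < len(text):
--             loc_tuple = find_entity_loc_in_text(form, text, start_ind)
--             if not loc_tuple:
--                 break
--             loc_list.append(loc_tuple)
--             start_ind = loc_tuple[1]
--     return loc_list
-- ===== SOURCE B (Python) =====
-- def find_all_loc_in_text(entity, text):
--     '''
--     Find all the location of the entity in the text
--     '''
--     c = entity[0]
--     alt = (c.lower() if c.isupper() else c.upper() if c.islower() else c) + entity[1:]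
--     forms = [entity] + ([alt] if alt != entity else [])
--     k = len(entity)
--     index = {}
--     for i in range(len(text) - k + 1):
--         index.setdefault(text[i:i+k], []).append(i)
--     out = []
--     for form in forms:
--         nxt = 0
--         for i in index.get(form, []):
--             if nxt <= i:
--                 out.append((i, i + k))
--                 nxt = i + k
--     return out
-- ===== Notes on version B (the rewrite author's own statement) =====
-- stated objective: alternative
-- what changed: Replaces A's per-form repeated str.find-and-jump scan (two helper functions) by a k-gram index of the text built once (a dict mapping each length-k slice to its list of start positions), after which each form is resolved by a dict lookup plus a greedy non-overlap filter over its precomputed position list - the per-form scan of the text disappears.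
import Mathlib
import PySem

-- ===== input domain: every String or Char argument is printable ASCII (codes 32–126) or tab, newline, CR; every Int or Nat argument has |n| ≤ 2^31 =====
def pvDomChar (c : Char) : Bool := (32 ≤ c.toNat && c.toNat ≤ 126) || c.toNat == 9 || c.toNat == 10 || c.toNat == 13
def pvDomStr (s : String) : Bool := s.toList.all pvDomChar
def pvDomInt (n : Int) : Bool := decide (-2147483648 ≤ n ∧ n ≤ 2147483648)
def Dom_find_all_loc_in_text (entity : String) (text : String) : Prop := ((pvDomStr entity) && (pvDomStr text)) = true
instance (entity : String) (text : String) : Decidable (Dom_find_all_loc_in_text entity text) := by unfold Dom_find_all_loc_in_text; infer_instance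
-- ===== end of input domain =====

-- B replaces A's per-form repeated str.find-and-jump scan by a k-gram index of the text built
-- ONCE (dict slice → positions), followed by a greedy non-overlap filter over each form's
-- precomputed position list (objective: alternative). Equivalence on Pre_ (nonempty entity;
-- A raises IndexError on "").

-- ===== PORT A =====
-- get_altname: Python is/upper/lower on the single char entity[0]; PySem.Chars.isupper/islower/
-- lowerChar/upperChar are exact for these on the ASCII domain. Python raises IndexError on
-- entity = '' (entity[0]); that input is excluded by Pre_, the port returns [] there.
def getAltname (e : List Char) : List Char :=
  match e with
  | [] => []
  | c :: rest =>
    let alt1 := if PySem.Chars.isupper c then PySem.Chars.lowerChar c :: rest else c :: rest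
    if PySem.Chars.islower c then PySem.Chars.upperChar c :: rest else alt1

-- find_entity_loc_in_text: text.find(entity, start_ind) is PySem.Chars.findFrom
def findEntityLocInText (entity t : List Char) (startInd : Int) : Option (Int × Int) :=
  let loc := PySem.Chars.findFrom t entity startInd none
  if loc = -1 then none else some (loc, loc + entity.length)

-- the 'while start_ind < len(text)' loop of A, fuel-guarded (Python diverges only for an empty
-- form, which Pre_ excludes; fuel = len(text)+1 is enough for every nonempty form)
def aLoop (form t : List Char) : Nat → Int → List (Int × Int)
  | 0, _ => []
  | fuel+1, startInd =>
    if startInd < (t.length : Int) then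
      match findEntityLocInText form t startInd with
      | none => []
      | some lt => lt :: aLoop form t fuel lt.2
    else []

def find_all_loc_in_text (entity : String) (text : String) : List (Int × Int) :=
  let e := entity.toList
  let t := text.toList
  let allforms := if getAltname e ≠ e then [e, getAltname e] else [e]
  allforms.foldl (fun acc form => acc ++ aLoop form t (t.length + 1) 0) []

-- ===== PORT B =====
-- one swapcase-style expression for the case variant (exact on the ASCII domain)
def swapChar (c : Char) : Char :=
  if PySem.Chars.isupper c then PySem.Chars.lowerChar c
  else if PySem.Chars.islower c then PySem.Chars.upperChar c
  else c

-- the k-gram index: for i in range(len(text)-k+1): index.setdefault(text[i:i+k], []).append(i)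
def bIndex (t : List Char) (k : Nat) : PySem.Dict (List Char) (List Int) :=
  (PySem.List.pyRange 0 ((t.length : Int) - (k : Int) + 1) 1).foldl
    (fun d i => d.modify ((t.drop i.toNat).take k) [] (fun l => l ++ [i])) PySem.Dict.empty

-- the greedy non-overlap pass: nxt = 0; for i in occ: if nxt <= i: append (i, i+k); nxt = i+k
def bGreedy (k : Nat) (occ : List Int) : List (Int × Int) :=
  (occ.foldl (fun (st : List (Int × Int) × Int) i =>
      if st.2 ≤ i then (st.1 ++ [(i, i + (k : Int))], i + (k : Int)) else st) ([], 0)).1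

-- entity[0] raises IndexError on entity = '' in B too (excluded by Pre_); port returns [] there.
def find_all_loc_in_text_alt (entity : String) (text : String) : List (Int × Int) :=
  match entity.toList with
  | [] => []
  | c :: rest =>
    let t := text.toList
    let alt := swapChar c :: rest
    let forms := (c :: rest) :: (if alt ≠ c :: rest then [alt] else [])
    let k := rest.length + 1
    let index := bIndex t k
    forms.flatMap (fun form => bGreedy k (index.getD form []))

-- ===== PRECONDITION & SPEC =====
-- Pre_ excludes exactly entity = "", on which both A and B raise IndexError (entity[0]).
def Pre_find_all_loc_in_text (entity : String) (text : String) : Prop := entity ≠ ""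
instance (entity : String) (text : String) : Decidable (Pre_find_all_loc_in_text entity text) := by
  unfold Pre_find_all_loc_in_text; infer_instance

def pvWitness_find_all_loc_in_text : String × String := ("aB", "xaBYab aB")

def Spec_find_all_loc_in_text (entity : String) (text : String) (out : List (Int × Int)) : Prop := out = find_all_loc_in_text_alt entity text
instance (entity : String) (text : String) (out : List (Int × Int)) : Decidable (Spec_find_all_loc_in_text entity text out) := by unfold Spec_find_all_loc_in_text; infer_instance

-- ===== CLAIM =====
def Claim_equal_find_all_loc_in_text : Prop := ∀ (entity : String) (text : String), Dom_find_all_loc_in_text entity text → Pre_find_all_loc_in_text entity text → Spec_find_all_loc_in_text entity text (find_all_loc_in_text entity text)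

-- ===== LEMMAS AND PROOFS =====

-- reference scan both programs are reduced to (well-founded, no fuel)
def scanSpec (form t : List Char) (i : Nat) : List (Int × Int) :=
  if h : i < t.length ∧ form ≠ [] then
    if form <+: t.drop i then
      ((i : Int), (i : Int) + form.length) :: scanSpec form t (i + form.length)
    else scanSpec form t (i + 1)
  else []
termination_by t.length - i
decreasing_by
  · have : 0 < form.length := List.length_pos_iff.mpr h.2
    omega
  · omega

lemma isupper_islower (c : Char) (h : PySem.Chars.isupper c = true) :
    PySem.Chars.islower c = false := by
  rw [Bool.eq_false_iff]
  intro h2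
  have hA : ('A').val.toNat = 65 := rfl
  have hZ : ('Z').val.toNat = 90 := rfl
  have ha : ('a').val.toNat = 97 := rfl
  have hz : ('z').val.toNat = 122 := rfl
  simp only [PySem.Chars.isupper, PySem.Chars.islower, Bool.and_eq_true, decide_eq_true_iff,
    Char.le_def, UInt32.le_iff_toNat_le, hA, hZ, ha, hz] at h h2
  omega

lemma getAltname_eq_swap (c : Char) (rest : List Char) :
    getAltname (c :: rest) = swapChar c :: rest := by
  unfold getAltname swapChar
  by_cases hu : PySem.Chars.isupper c
  · simp [hu, isupper_islower c hu]
  · by_cases hl : PySem.Chars.islower c <;> simp [hu, hl]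

lemma scanSpec_nil (form t : List Char) (i : Nat) (h : form = [] ∨ t.length ≤ i) :
    scanSpec form t i = [] := by
  unfold scanSpec
  rw [dif_neg]
  rintro ⟨h1, h2⟩
  rcases h with h | h
  · exact h2 h
  · omega

lemma scanSpec_nil_of_not_infix (form t : List Char) (i : Nat)
    (h : ¬ form <:+: t.drop i) : scanSpec form t i = [] := by
  unfold scanSpec
  split
  · rename_i hc
    have hp : ¬ form <+: t.drop i := fun hp => h hp.isInfix
    rw [if_neg hp]
    apply scanSpec_nil_of_not_infix
    intro hinf
    have hsuf : t.drop (i+1) <:+ t.drop i := by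
      have := List.drop_suffix 1 (t.drop i)
      rwa [List.drop_drop] at this
    exact h (hinf.trans hsuf.isInfix)
  · rfl
termination_by t.length - i
decreasing_by omega

lemma scanSpec_skip (form t : List Char) (i j : Nat) (hij : i ≤ j)
    (hnone : ∀ x, i ≤ x → x < j → ¬ form <+: t.drop x) :
    scanSpec form t i = scanSpec form t j := by
  rcases Nat.eq_or_lt_of_le hij with rfl | hlt
  · rfl
  · have step : scanSpec form t i = scanSpec form t (i+1) := by
      conv_lhs => rw [scanSpec]
      split
      · rw [if_neg (hnone i le_rfl hlt)]
      · rename_i hc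
        rw [scanSpec_nil form t (i+1) ?_]
        by_cases hf : form = []
        · exact Or.inl hf
        · refine Or.inr ?_
          by_contra hlen
          exact hc ⟨by omega, hf⟩
    rw [step]
    exact scanSpec_skip form t (i+1) j hlt (fun x hx hxj => hnone x (by omega) hxj)
termination_by j - i
decreasing_by omega

lemma prefix_lt_length (form t : List Char) (j : Nat) (hne : form ≠ [])
    (hp : form <+: t.drop j) : j < t.length := by
  by_contra h
  rw [List.drop_eq_nil_of_le (by omega)] at hp
  exact hne (List.prefix_nil.mp hp)

lemma aLoop_eq_scanSpec (form t : List Char) (hne : form ≠ []) :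
    ∀ fuel i, t.length - i < fuel → aLoop form t fuel (i : Int) = scanSpec form t i
  | 0, i, hfuel => by omega
  | fuel+1, i, hfuel => by
    have hk : 0 < form.length := List.length_pos_iff.mpr hne
    rw [aLoop]
    by_cases hi : i < t.length
    · rw [if_pos (by exact_mod_cast hi)]
      simp only [findEntityLocInText]
      by_cases hf : PySem.Chars.findFrom t form (i : Int) none = -1
      · rw [if_pos hf]
        have hninf := (PySem.Chars.findFrom_natCast_eq_neg_one_iff t form i (le_of_lt hi)).mp hf
        rw [scanSpec_nil_of_not_infix form t i hninf]
      · rw [if_neg hf]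
        obtain ⟨hle, hpre, hmin⟩ :=
          PySem.Chars.findFrom_natCast_spec t form i (le_of_lt hi) hf
        set f := PySem.Chars.findFrom t form (i : Int) none with hfdef
        have hf0 : 0 ≤ f := le_trans (by exact_mod_cast Int.natCast_nonneg i) hle
        have hfj : ((f.toNat : Nat) : Int) = f := Int.toNat_of_nonneg hf0
        have hij : i ≤ f.toNat := by omega
        have hjlt : f.toNat < t.length := prefix_lt_length form t f.toNat hne hpre
        rw [scanSpec_skip form t i f.toNat hij hmin]
        rw [scanSpec, dif_pos ⟨hjlt, hne⟩, if_pos hpre]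
        have htail : aLoop form t fuel (f + ↑form.length) = scanSpec form t (f.toNat + form.length) := by
          have : f + (form.length : Int) = ((f.toNat + form.length : Nat) : Int) := by
            push_cast; omega
          rw [this]
          exact aLoop_eq_scanSpec form t hne fuel (f.toNat + form.length) (by omega)
        simp only [htail, hfj]
    · rw [if_neg (by exact_mod_cast hi), scanSpec_nil form t i (Or.inr (by omega))]

-- B side: the index's list for a form is the increasing list of its (overlapping) occurrence starts
lemma bIndex_getD (t form : List Char) (k : Nat) :
    (bIndex t k).getD form [] =
      ((List.range ((t.length : Int) - (k : Int) + 1).toNat).filter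
          (fun j => (t.drop j).take k == form)).map (fun j : Nat => (j : Int)) := by
  unfold bIndex
  rw [PySem.List.pyRange_one]
  simp only [zero_add, Int.sub_zero]
  rw [List.foldl_map]
  have h1 : (List.range ((t.length : Int) - (k : Int) + 1).toNat).foldl
      (fun d (j : Nat) => d.modify ((t.drop ((j : Int)).toNat).take k) [] (fun l => l ++ [(j : Int)])) PySem.Dict.empty
    = ((List.range ((t.length : Int) - (k : Int) + 1).toNat).map
        (fun j : Nat => (((t.drop j).take k), (j : Int)))).foldl
        (fun d p => d.modify p.1 [] (fun l => l ++ [p.2])) PySem.Dict.empty := by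
    rw [List.foldl_map]
    simp
  rw [h1, PySem.Dict.getD_foldl_modify_append]
  simp [List.filter_map, List.map_map, Function.comp_def]

-- recursion form of B's greedy fold, on Nat positions
def gRec (k : Nat) : List Nat → Nat → List (Int × Int)
  | [], _ => []
  | j :: rest, nxt =>
    if nxt ≤ j then ((j : Int), (j : Int) + (k : Int)) :: gRec k rest (j + k)
    else gRec k rest nxt

lemma bGreedy_fold_aux (k : Nat) : ∀ (l : List Nat) (acc : List (Int × Int)) (nxt : Nat),
    ((l.map (fun j : Nat => (j : Int))).foldl (fun (st : List (Int × Int) × Int) i =>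
      if st.2 ≤ i then (st.1 ++ [(i, i + (k : Int))], i + (k : Int)) else st) (acc, (nxt : Int))).1
      = acc ++ gRec k l nxt
  | [], acc, nxt => by simp [gRec]
  | j :: rest, acc, nxt => by
    simp only [List.map_cons, List.foldl_cons, gRec]
    by_cases h : nxt ≤ j
    · rw [if_pos (by exact_mod_cast h), if_pos h]
      have hc : (j : Int) + (k : Int) = ((j + k : Nat) : Int) := by push_cast; ring
      rw [hc, bGreedy_fold_aux k rest]
      simp
    · rw [if_neg (by exact_mod_cast h), if_neg h]
      exact bGreedy_fold_aux k rest acc nxt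

lemma bGreedy_eq_gRec (k : Nat) (l : List Nat) :
    bGreedy k (l.map (fun j : Nat => (j : Int))) = gRec k l 0 := by
  unfold bGreedy
  have := bGreedy_fold_aux k l [] 0
  simpa using this

-- the greedy pass over the complete sorted occurrence list computes the scan
lemma gRec_eq_scanSpec (form t : List Char) (hne : form ≠ []) :
    ∀ (l : List Nat) (m nxt : Nat), m ≤ nxt → l.Pairwise (· < ·) →
      (∀ j, j ∈ l ↔ (m ≤ j ∧ form <+: t.drop j)) →
      gRec form.length l nxt = scanSpec form t nxt
  | [], m, nxt, hmn, _, hmem => by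
    rw [gRec]
    by_cases hn : t.length ≤ nxt
    · exact (scanSpec_nil form t nxt (Or.inr hn)).symm
    · rw [scanSpec_skip form t nxt t.length (by omega)
        (fun x hx hxl hp => by
          have := (hmem x).mpr ⟨le_trans hmn hx, hp⟩
          simp at this)]
      exact (scanSpec_nil form t t.length (Or.inr le_rfl)).symm
  | j :: rest, m, nxt, hmn, hsort, hmem => by
    have hk : 0 < form.length := List.length_pos_iff.mpr hne
    obtain ⟨hmj, hpj⟩ := (hmem j).mp (List.mem_cons_self)
    have hjlt : j < t.length := prefix_lt_length form t j hne hpj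
    have hsrest : rest.Pairwise (· < ·) := hsort.tail
    have hgt : ∀ x ∈ rest, j < x := fun x hx => (List.pairwise_cons.mp hsort).1 x hx
    have hmemr : ∀ x, x ∈ rest ↔ (j + 1 ≤ x ∧ form <+: t.drop x) := by
      intro x
      constructor
      · intro hx
        exact ⟨hgt x hx, ((hmem x).mp (List.mem_cons_of_mem _ hx)).2⟩
      · rintro ⟨hx1, hx2⟩
        have : x ∈ j :: rest := (hmem x).mpr ⟨by omega, hx2⟩
        rcases List.mem_cons.mp this with rfl | h
        · omega
        · exact h
    rw [gRec]
    by_cases hc : nxt ≤ j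
    · rw [if_pos hc]
      rw [scanSpec_skip form t nxt j hc (fun x hx hxl hp => by
        have := (hmem x).mpr ⟨le_trans hmn hx, hp⟩
        rcases List.mem_cons.mp this with rfl | h
        · omega
        · exact absurd (hgt x h) (by omega))]
      rw [scanSpec, dif_pos ⟨hjlt, hne⟩, if_pos hpj]
      congr 1
      exact gRec_eq_scanSpec form t hne rest (j+1) (j + form.length) (by omega) hsrest hmemr
    · rw [if_neg hc]
      exact gRec_eq_scanSpec form t hne rest (j+1) nxt (by omega) hsrest hmemr

-- B's index + greedy pass over one form computes the reference scan
lemma b_form_eq_scan (t form : List Char) (hne : form ≠ []) :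
    bGreedy form.length ((bIndex t form.length).getD form []) = scanSpec form t 0 := by
  rw [bIndex_getD, bGreedy_eq_gRec]
  apply gRec_eq_scanSpec form t hne _ 0 0 le_rfl
  · exact List.Pairwise.sublist List.filter_sublist List.pairwise_lt_range
  · intro j
    simp only [List.mem_filter, List.mem_range, beq_iff_eq, Nat.zero_le, true_and]
    constructor
    · rintro ⟨hj, htake⟩
      exact List.prefix_iff_eq_take.mpr htake.symm
    · intro hp
      have htake : (t.drop j).take form.length = form := (List.prefix_iff_eq_take.mp hp).symm
      have hlen := hp.length_le
      have hjl := prefix_lt_length form t j hne hp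
      simp only [List.length_drop] at hlen
      exact ⟨by omega, htake⟩

-- ===== VERDICT (by name: the statement is the Claim_ definition above) =====
theorem find_all_loc_in_text_spec : Claim_equal_find_all_loc_in_text := by
  intro entity text _ hpre
  unfold Spec_find_all_loc_in_text
  have hnil : entity.toList ≠ [] := by
    simp only [ne_eq, String.toList_eq_nil_iff]; exact hpre
  cases he : entity.toList with
  | nil => exact absurd he hnil
  | cons c rest =>
    unfold find_all_loc_in_text find_all_loc_in_text_alt
    simp only [he, getAltname_eq_swap]
    set t := text.toList
    have hfuel : t.length - 0 < t.length + 1 := by omega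
    have hAB : ∀ form : List Char, form ≠ [] → form.length = rest.length + 1 →
        aLoop form t (t.length + 1) 0 = bGreedy (rest.length + 1) ((bIndex t (rest.length + 1)).getD form []) := by
      intro form hf hlen
      have h1 := aLoop_eq_scanSpec form t hf (t.length + 1) 0 hfuel
      rw [Nat.cast_zero] at h1
      rw [h1, ← hlen, b_form_eq_scan t form hf]
    by_cases hd : swapChar c :: rest = c :: rest
    · simp only [hd, ne_eq, not_true_eq_false, if_false]
      simp [List.foldl, List.flatMap, hAB (c :: rest) (by simp) (by simp)]
    · simp only [ne_eq, hd, not_false_eq_true, if_true]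
      simp [List.foldl, List.flatMap, hAB (c :: rest) (by simp) (by simp),
        hAB (swapChar c :: rest) (by simp) (by simp)]
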